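-- pv_equiv track=rewrite | github.com/ruimiguelforte/aoc2020 | problems/day21.py | build_allergen_map
-- ===== SOURCE A (Python) =====
-- def build_allergen_map(foods):
--     allergen_map = {}
--     for ingredients, allergens in foods:
--         for allergen in allergens:
--             if allergen not in allergen_map:
--                 allergen_map[allergen] = ingredients
--             else:
--                 allergen_map[allergen] = allergen_map[allergen].intersection(ingredients)
--     return allergen_map
-- ===== SOURCE B (Python) =====
-- def build_allergen_map(foods):
--     # Phase 1: group-by — map each allergen to the list of ingredient sets of foods containing it.
--     groups = {}
--     for ingredients, allergens in foods:
--         for allergen in allergens: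
--             groups.setdefault(allergen, []).append(ingredients)
--
--     # Phase 2: reduce each group left-to-right with set intersection.
--     def intersect_all(sets):
--         result = sets[0]
--         for s in sets[1:]:
--             result = result & s
--         return result
--
--     return {allergen: intersect_all(sets) for allergen, sets in groups.items()}
-- ===== Notes on version B (the rewrite author's own statement) =====
-- stated objective: alternative
-- what changed: Replaces A's single pass that interleaves dict building with incremental intersection by two separate phases: a group-by pass collecting each allergen's list of ingredient sets, then a per-allergen left-to-right reduce with set intersection.
import Mathlib
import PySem

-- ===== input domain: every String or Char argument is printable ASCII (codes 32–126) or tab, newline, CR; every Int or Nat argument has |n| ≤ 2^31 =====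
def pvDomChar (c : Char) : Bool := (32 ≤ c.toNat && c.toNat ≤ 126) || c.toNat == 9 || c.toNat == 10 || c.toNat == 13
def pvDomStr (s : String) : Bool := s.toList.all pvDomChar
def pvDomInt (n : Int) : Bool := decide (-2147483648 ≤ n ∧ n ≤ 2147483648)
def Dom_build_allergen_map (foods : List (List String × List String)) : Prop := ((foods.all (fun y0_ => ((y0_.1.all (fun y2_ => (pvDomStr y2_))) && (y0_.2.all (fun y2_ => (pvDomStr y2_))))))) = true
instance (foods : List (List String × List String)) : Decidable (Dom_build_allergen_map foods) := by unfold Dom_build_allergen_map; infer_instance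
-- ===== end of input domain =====

-- ===== PORT A =====
def build_allergen_map (foods : List (List String × List String)) : List (String × List String) :=
  (foods.foldl
    (fun m food =>
      food.2.foldl
        (fun m allergen =>
          if m.contains allergen = false then m.insert allergen food.1
          else m.insert allergen (PySem.Set.inter (m.getD allergen []) food.1))
        m)
    PySem.Dict.empty).items

-- ===== PORT B =====
-- B: one group-by pass (allergen -> list of ingredient sets of its foods), then each group
-- is reduced left-to-right with set intersection.  Same asymptotic cost; objective: alternative decomposition.
-- intersect_all(sets) of Source B: sets[0] folded with '&' over sets[1:]
def intersectAll (sets : List (List String)) : List String :=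
  (sets.drop 1).foldl PySem.Set.inter (sets.headD [])

def build_allergen_map_alt (foods : List (List String × List String)) : List (String × List String) :=
  let groups := foods.foldl
    (fun g food =>
      food.2.foldl (fun g allergen => g.modify allergen [] (fun ls => ls ++ [food.1])) g)
    PySem.Dict.empty
  -- the dict comprehension of Source B: groups' keys are distinct, so its items are exactly this map
  groups.items.map (fun kv => (kv.1, intersectAll kv.2))

-- ===== PRECONDITION & SPEC =====
def Spec_build_allergen_map (foods : List (List String × List String)) (out : List (String × List String)) : Prop := out = build_allergen_map_alt foods
instance (foods : List (List String × List String)) (out : List (String × List String)) : Decidable (Spec_build_allergen_map foods out) := by unfold Spec_build_allergen_map; infer_instance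

-- ===== CLAIM (what is proved, stated in full; the proofs are below) =====
def Claim_equal_build_allergen_map : Prop := ∀ (foods : List (List String × List String)), Dom_build_allergen_map foods → Spec_build_allergen_map foods (build_allergen_map foods)

-- ===== LEMMAS AND PROOFS =====

-- "finish" a grouping dict: reduce every group with intersection (proof-only helper)
def finD (g : PySem.Dict String (List (List String))) : PySem.Dict String (List String) :=
  PySem.Dict.mk (g.items.map (fun kv => (kv.1, intersectAll kv.2)))

theorem intersectAll_append (ls : List (List String)) (i : List String) (h : ls ≠ []) :
    intersectAll (ls ++ [i]) = PySem.Set.inter (intersectAll ls) i := by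
  cases ls with
  | nil => exact absurd rfl h
  | cons x xs => simp [intersectAll, List.foldl_append]

theorem contains_finD (g : PySem.Dict String (List (List String))) (a : String) :
    (finD g).contains a = g.contains a := by
  simp [finD, PySem.Dict.contains, Function.comp_def]

theorem get?_finD (g : PySem.Dict String (List (List String))) (a : String) :
    (finD g).get? a = (g.get? a).map intersectAll := by
  simp [finD, PySem.Dict.get?, List.find?_map, Function.comp_def]

theorem getD_finD (g : PySem.Dict String (List (List String))) (a : String) :
    (finD g).getD a [] = intersectAll (g.getD a []) := by
  cases hv : g.get? a with
  | none =>
    have hc : g.contains a = false := by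
      rw [PySem.Dict.contains_eq_isSome_get?, hv]; rfl
    have hc' : (finD g).contains a = false := by rw [contains_finD]; exact hc
    rw [PySem.Dict.getD_of_not_contains _ _ hc', PySem.Dict.getD_of_not_contains _ _ hc]
    rfl
  | some v =>
    have hv' : (finD g).get? a = some (intersectAll v) := by rw [get?_finD, hv]; rfl
    rw [PySem.Dict.getD_of_get?_eq_some _ _ hv', PySem.Dict.getD_of_get?_eq_some _ _ hv]

theorem step_eq (g : PySem.Dict String (List (List String)))
    (hg : ∀ kv ∈ g.items, kv.2 ≠ []) (a : String) (i : List String) :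
    (if (finD g).contains a = false then (finD g).insert a i
     else (finD g).insert a (PySem.Set.inter ((finD g).getD a []) i))
    = finD (g.modify a [] (fun ls => ls ++ [i])) := by
  cases hc : g.contains a with
  | false =>
    have hcf : (finD g).contains a = false := by rw [contains_finD]; exact hc
    rw [hcf, if_pos rfl]
    simp only [PySem.Dict.modify, PySem.Dict.getD_of_not_contains _ _ hc]
    apply PySem.Dict.ext
    simp only [PySem.Dict.insert]
    rw [if_neg (by simp [hcf]), if_neg (by simp [hc])]
    simp [finD, intersectAll]
  | true =>
    have hs : (g.get? a).isSome := by rw [← PySem.Dict.contains_eq_isSome_get?, hc]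
    obtain ⟨v, hv⟩ := Option.isSome_iff_exists.mp hs
    have hvne : v ≠ [] := hg _ (PySem.Dict.mem_items_of_get?_eq_some g hv)
    have hcf : (finD g).contains a = true := by rw [contains_finD]; exact hc
    rw [hcf, if_neg (by simp)]
    simp only [PySem.Dict.modify, PySem.Dict.getD_of_get?_eq_some _ _ hv]
    apply PySem.Dict.ext
    simp only [PySem.Dict.insert]
    rw [if_pos hcf, if_pos hc]
    rw [getD_finD, PySem.Dict.getD_of_get?_eq_some _ _ hv]
    simp only [finD, List.map_map]
    apply List.map_congr_left
    intro kv _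
    by_cases hk : kv.1 = a
    · simp [hk, intersectAll_append v i hvne]
    · simp [hk]

theorem hg_step (g : PySem.Dict String (List (List String)))
    (hg : ∀ kv ∈ g.items, kv.2 ≠ []) (a : String) (i : List String) :
    ∀ kv ∈ (g.modify a [] (fun ls => ls ++ [i])).items, kv.2 ≠ [] := by
  intro kv hkv
  simp only [PySem.Dict.modify, PySem.Dict.insert] at hkv
  split at hkv
  · dsimp only at hkv
    rcases List.mem_map.mp hkv with ⟨p, hp, hpe⟩
    by_cases hk : (p.1 == a) = true
    · rw [if_pos hk] at hpe; subst hpe; simp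
    · rw [if_neg hk] at hpe; subst hpe; exact hg _ hp
  · dsimp only at hkv
    rcases List.mem_append.mp hkv with h | h
    · exact hg _ h
    · simp only [List.mem_singleton] at h
      subst h; simp

theorem inner_eq (al : List String) (i : List String)
    (g : PySem.Dict String (List (List String))) (hg : ∀ kv ∈ g.items, kv.2 ≠ []) :
    al.foldl
      (fun m allergen =>
        if m.contains allergen = false then m.insert allergen i
        else m.insert allergen (PySem.Set.inter (m.getD allergen []) i)) (finD g)
    = finD (al.foldl (fun g allergen => g.modify allergen [] (fun ls => ls ++ [i])) g) := by
  induction al generalizing g with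
  | nil => rfl
  | cons a al ih =>
    simp only [List.foldl_cons]
    rw [step_eq g hg a i]
    exact ih _ (hg_step g hg a i)

theorem inner_hg (al : List String) (i : List String)
    (g : PySem.Dict String (List (List String))) (hg : ∀ kv ∈ g.items, kv.2 ≠ []) :
    ∀ kv ∈ (al.foldl (fun g allergen => g.modify allergen [] (fun ls => ls ++ [i])) g).items,
      kv.2 ≠ [] := by
  induction al generalizing g with
  | nil => exact hg
  | cons a al ih => exact ih _ (hg_step g hg a i)

theorem outer_eq (foods : List (List String × List String))
    (g : PySem.Dict String (List (List String))) (hg : ∀ kv ∈ g.items, kv.2 ≠ []) :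
    foods.foldl
      (fun m food =>
        food.2.foldl
          (fun m allergen =>
            if m.contains allergen = false then m.insert allergen food.1
            else m.insert allergen (PySem.Set.inter (m.getD allergen []) food.1)) m) (finD g)
    = finD (foods.foldl
        (fun g food =>
          food.2.foldl (fun g allergen => g.modify allergen [] (fun ls => ls ++ [food.1])) g) g) := by
  induction foods generalizing g with
  | nil => rfl
  | cons food foods ih =>
    simp only [List.foldl_cons]
    rw [inner_eq food.2 food.1 g hg]
    exact ih _ (inner_hg food.2 food.1 g hg)

-- ===== VERDICT (by name: the statement is the Claim_ definition above) =====
theorem build_allergen_map_spec : Claim_equal_build_allergen_map := by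
  intro foods _
  unfold Spec_build_allergen_map build_allergen_map build_allergen_map_alt
  have h := outer_eq foods PySem.Dict.empty (by intro kv hkv; simp [PySem.Dict.empty] at hkv)
  have he : finD PySem.Dict.empty = PySem.Dict.empty := rfl
  rw [he] at h
  rw [h]
  rfl
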